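-- pv_equiv track=rewrite | github.com/JonathanOll/Tetris-AI-V2 | ai.py | get_piece
-- ===== SOURCE A (Python) =====
-- def get_piece(moving):  # isolate moving piece
--
--     minx = min(moving, key=lambda a: a[0])[0]
--     miny = min(moving, key=lambda a: a[1])[1]
--     maxx = max(moving, key=lambda a: a[0])[0]
--     maxy = max(moving, key=lambda a: a[1])[1]
--
--     piece = [[0] * (maxx - minx + 1) for a in range(maxy-miny + 1)]
--
--     for x, y in moving:
--
--         piece[y-miny][x-minx] = 1
--
--     return piece
-- ===== SOURCE B (Python) =====
-- def get_piece(moving):  # isolate moving piece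
--     # single pass for the bounding box, then membership-built grid
--     (x0, y0) = moving[0]
--     minx = maxx = x0
--     miny = maxy = y0
--     for x, y in moving[1:]:
--         if x < minx: minx = x
--         if y < miny: miny = y
--         if x > maxx: maxx = x
--         if y > maxy: maxy = y
--     cells = set(moving)
--     return [[1 if (x + minx, y + miny) in cells else 0
--              for x in range(maxx - minx + 1)]
--             for y in range(maxy - miny + 1)]
-- ===== Notes on version B (the rewrite author's own statement) =====
-- stated objective: alternative
-- what changed: Replaces four min/max scans plus an imperative fill of a mutable grid by one bounding-box pass and a purely functional grid built cell-by-cell from a set-membership test.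
import Mathlib
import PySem

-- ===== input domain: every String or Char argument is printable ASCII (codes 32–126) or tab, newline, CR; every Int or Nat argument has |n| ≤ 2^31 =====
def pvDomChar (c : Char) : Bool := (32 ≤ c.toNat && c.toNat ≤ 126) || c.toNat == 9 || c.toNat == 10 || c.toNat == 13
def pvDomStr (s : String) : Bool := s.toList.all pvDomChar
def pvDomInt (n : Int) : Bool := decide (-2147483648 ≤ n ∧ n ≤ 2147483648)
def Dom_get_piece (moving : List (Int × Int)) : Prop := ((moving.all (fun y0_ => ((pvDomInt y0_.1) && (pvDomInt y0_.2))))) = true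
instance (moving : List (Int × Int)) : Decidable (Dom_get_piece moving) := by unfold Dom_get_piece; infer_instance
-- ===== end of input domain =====

-- B replaces A's four min/max scans and imperative grid fill by one bounding-box pass
-- and a grid built cell-by-cell from a set-membership test (alternative decomposition).

-- ===== PORT A =====
-- 'range(n)' for n ≥ 0 is the Ints 0..n-1: ported as (List.range n.toNat).map; exact since
-- n < 0 gives the empty range on both sides.  The indices 'y-miny'/'x-minx' are ≥ 0 for
-- every element of moving (miny/minx are the minima), so '.toNat' is exact here.
def get_piece (moving : List (Int × Int)) : List (List Int) :=
  match PySem.List.min? moving (fun a => a.1), PySem.List.min? moving (fun a => a.2),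
        PySem.List.max? moving (fun a => a.1), PySem.List.max? moving (fun a => a.2) with
  | some amnx, some amny, some amxx, some amxy =>
      let minx := amnx.1
      let miny := amny.2
      let maxx := amxx.1
      let maxy := amxy.2
      let piece : List (List Int) :=
        (List.range (maxy - miny + 1).toNat).map (fun _ => List.replicate (maxx - minx + 1).toNat 0)
      moving.foldl (fun g p =>
        g.set (p.2 - miny).toNat ((g.getD (p.2 - miny).toNat []).set (p.1 - minx).toNat 1)) piece
  | _, _, _, _ => []   -- min() on an empty list raises ValueError: excluded by Pre_

-- ===== PORT B =====
def get_piece_alt (moving : List (Int × Int)) : List (List Int) :=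
  match moving with
  | [] => []   -- moving[0] raises IndexError: excluded by Pre_
  | (x0, y0) :: rest =>
      let s := rest.foldl (fun (s : Int × Int × Int × Int) p =>
        (if p.1 < s.1 then p.1 else s.1,
         if p.2 < s.2.1 then p.2 else s.2.1,
         if p.1 > s.2.2.1 then p.1 else s.2.2.1,
         if p.2 > s.2.2.2 then p.2 else s.2.2.2)) (x0, y0, x0, y0)
      let minx := s.1
      let miny := s.2.1
      let maxx := s.2.2.1
      let maxy := s.2.2.2
      let cells := PySem.Set.ofList moving
      (List.range (maxy - miny + 1).toNat).map (fun (y : Nat) =>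
        (List.range (maxx - minx + 1).toNat).map (fun (x : Nat) =>
          if ((x : Int) + minx, (y : Int) + miny) ∈ cells then 1 else 0))

-- ===== PRECONDITION & SPEC =====
-- A raises ValueError (min() of an empty sequence) on the empty list, so it is excluded.
def Pre_get_piece (moving : List (Int × Int)) : Prop := moving ≠ []
instance (moving : List (Int × Int)) : Decidable (Pre_get_piece moving) := by unfold Pre_get_piece; infer_instance
def pvWitness_get_piece : (List (Int × Int)) := [(1, 2), (2, 2), (2, 3)]

def Spec_get_piece (moving : List (Int × Int)) (out : List (List Int)) : Prop := out = get_piece_alt moving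
instance (moving : List (Int × Int)) (out : List (List Int)) : Decidable (Spec_get_piece moving out) := by unfold Spec_get_piece; infer_instance

-- ===== CLAIM (what is proved, stated in full; the proofs are below) =====
def Claim_equal_get_piece : Prop := ∀ (moving : List (Int × Int)), Dom_get_piece moving → Pre_get_piece moving → Spec_get_piece moving (get_piece moving)

-- ===== LEMMAS AND PROOFS =====

-- B's four-accumulator fold is componentwise foldl min / foldl max over the coordinates.
theorem fold4_eq (rest : List (Int × Int)) (a b c d : Int) :
    rest.foldl (fun (s : Int × Int × Int × Int) p =>
        (if p.1 < s.1 then p.1 else s.1,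
         if p.2 < s.2.1 then p.2 else s.2.1,
         if p.1 > s.2.2.1 then p.1 else s.2.2.1,
         if p.2 > s.2.2.2 then p.2 else s.2.2.2)) (a, b, c, d)
    = ((rest.map Prod.fst).foldl min a, (rest.map Prod.snd).foldl min b,
       (rest.map Prod.fst).foldl max c, (rest.map Prod.snd).foldl max d) := by
  induction rest generalizing a b c d with
  | nil => rfl
  | cons p l ih =>
      have h1 : ∀ x y : Int, (if x < y then x else y) = min y x := by
        intro x y; rw [min_def]; split_ifs <;> omega
      have h2 : ∀ x y : Int, (if x > y then x else y) = max y x := by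
        intro x y; rw [max_def]; split_ifs <;> omega
      simp only [List.foldl_cons, List.map_cons]
      rw [ih, h1, h1, h2, h2]

theorem foldl_min_le_init (l : List Int) (s : Int) : l.foldl min s ≤ s := by
  induction l generalizing s with
  | nil => exact le_refl s
  | cons x t ih => exact le_trans (ih (min s x)) (min_le_left s x)

theorem foldl_min_le (l : List Int) (s : Int) : ∀ x ∈ l, l.foldl min s ≤ x := by
  induction l generalizing s with
  | nil => intro x hx; cases hx
  | cons y t ih =>
      intro x hx
      rcases List.mem_cons.mp hx with h | h
      · subst h; exact le_trans (foldl_min_le_init t (min s x)) (min_le_right s x)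
      · exact ih (min s y) x h

theorem foldl_min_mem (l : List Int) (s : Int) : l.foldl min s = s ∨ l.foldl min s ∈ l := by
  induction l generalizing s with
  | nil => exact Or.inl rfl
  | cons x t ih =>
      rcases ih (min s x) with h | h
      · rw [List.foldl_cons, h, min_def]
        split_ifs
        · exact Or.inl rfl
        · exact Or.inr (List.mem_cons_self)
      · exact Or.inr (List.mem_cons_of_mem _ h)

theorem foldl_max_ge_init (l : List Int) (s : Int) : s ≤ l.foldl max s := by
  induction l generalizing s with
  | nil => exact le_refl s
  | cons x t ih => exact le_trans (le_max_left s x) (ih (max s x))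

theorem foldl_max_ge (l : List Int) (s : Int) : ∀ x ∈ l, x ≤ l.foldl max s := by
  induction l generalizing s with
  | nil => intro x hx; cases hx
  | cons y t ih =>
      intro x hx
      rcases List.mem_cons.mp hx with h | h
      · subst h; exact le_trans (le_max_right s x) (foldl_max_ge_init t (max s x))
      · exact ih (max s y) x h

theorem foldl_max_mem (l : List Int) (s : Int) : l.foldl max s = s ∨ l.foldl max s ∈ l := by
  induction l generalizing s with
  | nil => exact Or.inl rfl
  | cons x t ih =>
      rcases ih (max s x) with h | h
      · rw [List.foldl_cons, h, max_def]
        split_ifs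
        · exact Or.inr (List.mem_cons_self)
        · exact Or.inl rfl
      · exact Or.inr (List.mem_cons_of_mem _ h)

-- The minimum value over x0 :: l is unique: any member that is a lower bound equals the running min.
theorem min_char (x0 : Int) (l : List Int) (m : Int)
    (hmem : m = x0 ∨ m ∈ l) (hle : ∀ y, (y = x0 ∨ y ∈ l) → m ≤ y) :
    m = l.foldl min x0 := by
  apply le_antisymm
  · rcases foldl_min_mem l x0 with h | h
    · rw [h]; exact hle x0 (Or.inl rfl)
    · exact hle _ (Or.inr h)
  · rcases hmem with h | h
    · rw [h]; exact foldl_min_le_init l x0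
    · exact foldl_min_le l x0 m h

theorem max_char (x0 : Int) (l : List Int) (m : Int)
    (hmem : m = x0 ∨ m ∈ l) (hge : ∀ y, (y = x0 ∨ y ∈ l) → y ≤ m) :
    m = l.foldl max x0 := by
  apply le_antisymm
  · rcases hmem with h | h
    · rw [h]; exact foldl_max_ge_init l x0
    · exact foldl_max_ge l x0 m h
  · rcases foldl_max_mem l x0 with h | h
    · rw [h]; exact hge x0 (Or.inl rfl)
    · exact hge _ (Or.inr h)

-- grid builder and A's fill step, named for the proofs
def gridOf (mnx mny mxx mxy : Int) (f : Nat → Nat → Int) : List (List Int) :=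
  (List.range (mxy - mny + 1).toNat).map (fun y =>
    (List.range (mxx - mnx + 1).toNat).map (fun x => f y x))

def fillStep (mnx mny : Int) (g : List (List Int)) (p : Int × Int) : List (List Int) :=
  g.set (p.2 - mny).toNat ((g.getD (p.2 - mny).toNat []).set (p.1 - mnx).toNat 1)

theorem set_range_map {α : Type} (W : Nat) (h : Nat → α) (c : Nat) (v : α) (_hc : c < W) :
    ((List.range W).map h).set c v = (List.range W).map (fun x => if x = c then v else h x) := by
  apply List.ext_getElem
  · simp
  · intro i h1 h2
    simp only [List.getElem_set, List.getElem_map, List.getElem_range]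
    split_ifs with ha hb hb
    · rfl
    · exact absurd ha.symm hb
    · exact absurd hb.symm ha
    · rfl

theorem step_grid (mnx mny mxx mxy : Int) (f : Nat → Nat → Int) (p : Int × Int)
    (h1 : mnx ≤ p.1) (h2 : p.1 ≤ mxx) (h3 : mny ≤ p.2) (h4 : p.2 ≤ mxy) :
    fillStep mnx mny (gridOf mnx mny mxx mxy f) p
      = gridOf mnx mny mxx mxy
          (fun y x => if y = (p.2 - mny).toNat ∧ x = (p.1 - mnx).toNat then 1 else f y x) := by
  have hr : (p.2 - mny).toNat < (mxy - mny + 1).toNat := by omega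
  have hcW : (p.1 - mnx).toNat < (mxx - mnx + 1).toNat := by omega
  have hrow : (gridOf mnx mny mxx mxy f).getD (p.2 - mny).toNat []
      = (List.range (mxx - mnx + 1).toNat).map (fun x => f (p.2 - mny).toNat x) := by
    rw [gridOf, List.getD_eq_getElem?_getD, List.getElem?_eq_getElem (by simpa using hr)]
    simp
  rw [fillStep, hrow, set_range_map _ _ _ _ hcW, gridOf, gridOf,
      set_range_map _ _ _ _ (by simpa using hr)]
  apply List.map_congr_left
  intro y hy
  split_ifs with h
  · subst h
    apply List.map_congr_left
    intro x hx
    split_ifs with hx1 hx2 hx2 <;> simp_all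
  · apply List.map_congr_left
    intro x hx
    split_ifs with hx1 <;> simp_all

theorem fill_grid (mnx mny mxx mxy : Int) (l : List (Int × Int)) (f : Nat → Nat → Int)
    (hb : ∀ p ∈ l, mnx ≤ p.1 ∧ p.1 ≤ mxx ∧ mny ≤ p.2 ∧ p.2 ≤ mxy) :
    l.foldl (fillStep mnx mny) (gridOf mnx mny mxx mxy f)
      = gridOf mnx mny mxx mxy
          (fun y x => if ((x : Int) + mnx, (y : Int) + mny) ∈ l then 1 else f y x) := by
  induction l generalizing f with
  | nil => simp [gridOf]
  | cons p t ih =>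
      obtain ⟨hp1, hp2, hp3, hp4⟩ := hb p List.mem_cons_self
      rw [List.foldl_cons, step_grid mnx mny mxx mxy f p hp1 hp2 hp3 hp4,
          ih _ (fun q hq => hb q (List.mem_cons_of_mem _ hq))]
      rw [gridOf, gridOf]
      apply List.map_congr_left
      intro y hy
      apply List.map_congr_left
      intro x hx
      have hyH : y < (mxy - mny + 1).toNat := List.mem_range.mp hy
      have hxW : x < (mxx - mnx + 1).toNat := List.mem_range.mp hx
      have hiff : (((x : Int) + mnx, (y : Int) + mny) = p)
          ↔ (y = (p.2 - mny).toNat ∧ x = (p.1 - mnx).toNat) := by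
        constructor
        · intro h
          have e1 : (x : Int) + mnx = p.1 := by rw [← h]
          have e2 : (y : Int) + mny = p.2 := by rw [← h]
          omega
        · intro ⟨hy', hx'⟩
          have : (x : Int) + mnx = p.1 ∧ (y : Int) + mny = p.2 := by omega
          rw [Prod.ext_iff]; exact ⟨this.1, this.2⟩
      by_cases hm : ((x : Int) + mnx, (y : Int) + mny) ∈ t
      · rw [if_pos hm, if_pos (List.mem_cons_of_mem p hm)]
      · by_cases hp : ((x : Int) + mnx, (y : Int) + mny) = p
        · rw [if_neg hm, if_pos (hiff.mp hp), if_pos (List.mem_cons.mpr (Or.inl hp))]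
        · have hno : ¬(y = (p.2 - mny).toNat ∧ x = (p.1 - mnx).toNat) := fun h => hp (hiff.mpr h)
          have hnc : ((x : Int) + mnx, (y : Int) + mny) ∉ p :: t := by
            intro hvp
            rcases List.mem_cons.mp hvp with h | h
            · exact hp h
            · exact hm h
          rw [if_neg hm, if_neg hno, if_neg hnc]

-- A's zero grid is gridOf of the constant-zero function.
theorem init_grid (mnx mny mxx mxy : Int) :
    (List.range (mxy - mny + 1).toNat).map
        (fun _ => List.replicate (mxx - mnx + 1).toNat (0 : Int))
      = gridOf mnx mny mxx mxy (fun _ _ => 0) := by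
  rw [gridOf]
  apply List.map_congr_left
  intro y _
  apply List.ext_getElem <;> simp

-- ===== VERDICT (by name: the statement is the Claim_ definition above) =====
theorem get_piece_spec : Claim_equal_get_piece := by
  intro moving _ hpre
  unfold Spec_get_piece
  match moving, hpre with
  | (x0, y0) :: rest, _ =>
    -- the four extremes, as running folds
    set mnx := (rest.map Prod.fst).foldl min x0 with hmnx_def
    set mny := (rest.map Prod.snd).foldl min y0 with hmny_def
    set mxx := (rest.map Prod.fst).foldl max x0 with hmxx_def
    set mxy := (rest.map Prod.snd).foldl max y0 with hmxy_def
    -- A's min?/max? scrutinees are some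
    obtain ⟨amnx, hmnx⟩ : ∃ m, PySem.List.min? ((x0, y0) :: rest) (fun a => a.1) = some m := by
      cases h : PySem.List.min? ((x0, y0) :: rest) (fun a => a.1) with
      | none => rw [PySem.List.min?_eq_none_iff] at h; exact absurd h (by simp)
      | some m => exact ⟨m, rfl⟩
    obtain ⟨amny, hmny⟩ : ∃ m, PySem.List.min? ((x0, y0) :: rest) (fun a => a.2) = some m := by
      cases h : PySem.List.min? ((x0, y0) :: rest) (fun a => a.2) with
      | none => rw [PySem.List.min?_eq_none_iff] at h; exact absurd h (by simp)
      | some m => exact ⟨m, rfl⟩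
    obtain ⟨amxx, hmxx⟩ : ∃ m, PySem.List.max? ((x0, y0) :: rest) (fun a => a.1) = some m := by
      cases h : PySem.List.max? ((x0, y0) :: rest) (fun a => a.1) with
      | none => rw [PySem.List.max?_eq_none_iff] at h; exact absurd h (by simp)
      | some m => exact ⟨m, rfl⟩
    obtain ⟨amxy, hmxy⟩ : ∃ m, PySem.List.max? ((x0, y0) :: rest) (fun a => a.2) = some m := by
      cases h : PySem.List.max? ((x0, y0) :: rest) (fun a => a.2) with
      | none => rw [PySem.List.max?_eq_none_iff] at h; exact absurd h (by simp)
      | some m => exact ⟨m, rfl⟩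
    -- their values are the fold extremes
    have hamnx : amnx.1 = mnx := by
      apply min_char
      · rcases List.mem_cons.mp (PySem.List.min?_mem hmnx) with h | h
        · exact Or.inl (by rw [h])
        · exact Or.inr (List.mem_map_of_mem h)
      · intro y hy
        rcases hy with h | h
        · exact h ▸ PySem.List.min?_isMin hmnx (x0, y0) List.mem_cons_self
        · obtain ⟨q, hq, rfl⟩ := List.mem_map.mp h
          exact PySem.List.min?_isMin hmnx q (List.mem_cons_of_mem _ hq)
    have hamny : amny.2 = mny := by
      apply min_char
      · rcases List.mem_cons.mp (PySem.List.min?_mem hmny) with h | h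
        · exact Or.inl (by rw [h])
        · exact Or.inr (List.mem_map_of_mem h)
      · intro y hy
        rcases hy with h | h
        · exact h ▸ PySem.List.min?_isMin hmny (x0, y0) List.mem_cons_self
        · obtain ⟨q, hq, rfl⟩ := List.mem_map.mp h
          exact PySem.List.min?_isMin hmny q (List.mem_cons_of_mem _ hq)
    have hamxx : amxx.1 = mxx := by
      apply max_char
      · rcases List.mem_cons.mp (PySem.List.max?_mem hmxx) with h | h
        · exact Or.inl (by rw [h])
        · exact Or.inr (List.mem_map_of_mem h)
      · intro y hy
        rcases hy with h | h
        · exact h ▸ PySem.List.max?_isMax hmxx (x0, y0) List.mem_cons_self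
        · obtain ⟨q, hq, rfl⟩ := List.mem_map.mp h
          exact PySem.List.max?_isMax hmxx q (List.mem_cons_of_mem _ hq)
    have hamxy : amxy.2 = mxy := by
      apply max_char
      · rcases List.mem_cons.mp (PySem.List.max?_mem hmxy) with h | h
        · exact Or.inl (by rw [h])
        · exact Or.inr (List.mem_map_of_mem h)
      · intro y hy
        rcases hy with h | h
        · exact h ▸ PySem.List.max?_isMax hmxy (x0, y0) List.mem_cons_self
        · obtain ⟨q, hq, rfl⟩ := List.mem_map.mp h
          exact PySem.List.max?_isMax hmxy q (List.mem_cons_of_mem _ hq)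
    -- every point lies in the bounding box
    have hb : ∀ p ∈ (x0, y0) :: rest, mnx ≤ p.1 ∧ p.1 ≤ mxx ∧ mny ≤ p.2 ∧ p.2 ≤ mxy := by
      intro p hp
      rcases List.mem_cons.mp hp with h | h
      · subst h
        exact ⟨foldl_min_le_init _ _, foldl_max_ge_init _ _,
               foldl_min_le_init _ _, foldl_max_ge_init _ _⟩
      · exact ⟨foldl_min_le _ _ _ (List.mem_map_of_mem h),
               foldl_max_ge _ _ _ (List.mem_map_of_mem h),
               foldl_min_le _ _ _ (List.mem_map_of_mem h),
               foldl_max_ge _ _ _ (List.mem_map_of_mem h)⟩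
    -- reduce both ports
    simp only [get_piece, hmnx, hmny, hmxx, hmxy, hamnx, hamny, hamxx, hamxy]
    simp only [get_piece_alt, fold4_eq]
    have hstep : (fun (g : List (List Int)) (p : Int × Int) =>
        g.set (p.2 - mny).toNat ((g.getD (p.2 - mny).toNat []).set (p.1 - mnx).toNat 1))
        = fillStep mnx mny := rfl
    rw [init_grid, hstep, fill_grid mnx mny mxx mxy _ _ hb]
    simp only [gridOf, PySem.Set.mem_ofList, List.mem_cons, Prod.mk.injEq]
    rw [← hmnx_def, ← hmny_def, ← hmxx_def, ← hmxy_def]
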